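-- pv_equiv track=rewrite | github.com/nmickel/CS-112 | H4/nmickel_230_H4.py | gravitate
-- ===== SOURCE A (Python) =====
-- def gravitate(nums, direction):
--     if direction == "right":
--         for enum in range(len(nums)):
--             for j in range(len(nums[enum])-1):
--                 nums[enum][j+1] = nums[enum][j+1]+nums[enum][j]
--                 # Adds the value of current element to the element on the right
--                 # and stores it in right
--                 nums[enum][j] = 0
--                 # Assigns 0 to the current element
--     else:
--         for enum in range(len(nums)):
--             for j in range(len(nums[enum])-1, 0, -1):
--                 nums[enum][j-1] = nums[enum][j-1]+nums[enum][j]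
--                 # Adds the value of current element to the element on the left
--                 # and stores it in left
--                 nums[enum][j] = 0
--     return nums
-- ===== SOURCE B (Python) =====
-- def gravitate(nums, direction):
--     # Mutates the inner rows in place (row[:] = ...) and returns nums, like A.
--     for row in nums:
--         if row:
--             total = sum(row)
--             zeros = [0] * (len(row) - 1)
--             if direction == "right":
--                 row[:] = zeros + [total]
--             else:
--                 row[:] = [total] + zeros
--     return nums
-- ===== Notes on version B (the rewrite author's own statement) =====
-- stated objective: simpler
-- what changed: Replaces the per-row pairwise shift-and-zero inner loops with computing each row's sum once and rewriting the row as zeros plus the total at the appropriate end.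
import Mathlib
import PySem

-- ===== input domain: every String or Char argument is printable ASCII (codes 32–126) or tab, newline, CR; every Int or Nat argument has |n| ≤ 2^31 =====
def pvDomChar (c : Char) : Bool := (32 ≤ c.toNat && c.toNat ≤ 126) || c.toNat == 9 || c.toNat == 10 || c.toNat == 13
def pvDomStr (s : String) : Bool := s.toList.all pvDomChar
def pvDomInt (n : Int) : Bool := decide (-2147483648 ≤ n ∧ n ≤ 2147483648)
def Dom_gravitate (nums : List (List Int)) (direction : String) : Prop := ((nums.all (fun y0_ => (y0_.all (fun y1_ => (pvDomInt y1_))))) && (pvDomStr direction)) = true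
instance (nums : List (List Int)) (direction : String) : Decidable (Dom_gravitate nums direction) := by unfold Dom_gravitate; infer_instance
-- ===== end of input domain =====

-- B replaces A's pairwise shift-and-zero loops by writing each row as zeros plus its
-- sum at one end (simpler). Both Pythons mutate the inner rows in place and return
-- nums; the equivalence proved here is about the returned value.

-- ===== PORT A =====
-- one step of A's "right" inner loop: row[j+1] += row[j]; row[j] = 0 (indices in range)
def gravStepR (row : List Int) (j : Nat) : List Int :=
  (row.set (j+1) (row.getD (j+1) 0 + row.getD j 0)).set j 0

-- one step of A's "left" inner loop: row[j-1] += row[j]; row[j] = 0 (indices in range)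
def gravStepL (row : List Int) (j : Nat) : List Int :=
  (row.set (j-1) (row.getD (j-1) 0 + row.getD j 0)).set j 0

def gravitate (nums : List (List Int)) (direction : String) : List (List Int) :=
  if direction == "right" then
    nums.map (fun row => (List.range (row.length - 1)).foldl gravStepR row)
  else
    -- range(len(row)-1, 0, -1) = the indices n-1, n-2, …, 1
    nums.map (fun row =>
      (((List.range (row.length - 1)).map (· + 1)).reverse).foldl gravStepL row)

-- ===== PORT B =====
def gravitate_alt (nums : List (List Int)) (direction : String) : List (List Int) :=
  nums.map (fun row =>
    if row.isEmpty then row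
    else if direction == "right" then List.replicate (row.length - 1) 0 ++ [row.sum]
    else row.sum :: List.replicate (row.length - 1) 0)

-- ===== PRECONDITION & SPEC =====
def Spec_gravitate (nums : List (List Int)) (direction : String) (out : List (List Int)) : Prop := out = gravitate_alt nums direction
instance (nums : List (List Int)) (direction : String) (out : List (List Int)) : Decidable (Spec_gravitate nums direction out) := by unfold Spec_gravitate; infer_instance

-- ===== CLAIM (what is proved, stated in full; the proofs are below) =====
def Claim_equal_gravitate : Prop := ∀ (nums : List (List Int)) (direction : String), Dom_gravitate nums direction → Spec_gravitate nums direction (gravitate nums direction)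

-- ===== LEMMAS AND PROOFS =====

-- set/getD on "prefix ++ rest" at an index past the prefix
theorem grav_set_append (pre l : List Int) (j : Nat) (x : Int) :
    (pre ++ l).set (pre.length + j) x = pre ++ l.set j x := by
  induction pre with
  | nil => simp
  | cons a t ih =>
    have h : t.length + 1 + j = (t.length + j) + 1 := by omega
    rw [List.cons_append, List.length_cons, h, List.set_cons_succ, ih, List.cons_append]

theorem grav_getD_append (pre l : List Int) (j : Nat) :
    (pre ++ l).getD (pre.length + j) 0 = l.getD j 0 := by
  induction pre with
  | nil => simp
  | cons a t ih =>
    have h : t.length + 1 + j = (t.length + j) + 1 := by omega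
    rw [List.cons_append, List.length_cons, h, List.getD_cons_succ, ih]

-- invariant of A's "right" loop: after k steps the first k cells are 0, cell k holds
-- the sum of the first k+1 original cells, the rest is untouched
theorem grav_right_inv (row : List Int) (k : Nat) (hk : k + 1 ≤ row.length) :
    (List.range k).foldl gravStepR row
      = List.replicate k 0 ++ ((row.take (k+1)).sum :: row.drop (k+1)) := by
  induction k with
  | zero =>
    cases row with
    | nil => simp at hk
    | cons a t => simp
  | succ k ih =>
    have hk' : k + 1 ≤ row.length := by omega
    have hx : k + 1 < row.length := by omega
    rw [List.range_succ, List.foldl_append, ih hk', List.drop_eq_getElem_cons hx]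
    have hlen : (List.replicate k (0:Int)).length = k := List.length_replicate
    simp only [List.foldl_cons, List.foldl_nil, gravStepR]
    have e1 : ∀ (S b : Int) (t : List Int), (List.replicate k (0:Int) ++ (S :: b :: t)).getD (k+1) 0 = b := by
      intro S b t
      have h := grav_getD_append (List.replicate k (0:Int)) (S :: b :: t) 1
      rw [hlen] at h
      simpa [List.getD] using h
    have e2 : ∀ (S b : Int) (t : List Int), (List.replicate k (0:Int) ++ (S :: b :: t)).getD k 0 = S := by
      intro S b t
      have h := grav_getD_append (List.replicate k (0:Int)) (S :: b :: t) 0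
      rw [hlen] at h
      simpa [List.getD] using h
    have s1 : ∀ (S b x : Int) (t : List Int), (List.replicate k (0:Int) ++ (S :: b :: t)).set (k+1) x = List.replicate k 0 ++ (S :: x :: t) := by
      intro S b x t
      have h := grav_set_append (List.replicate k (0:Int)) (S :: b :: t) 1 x
      rw [hlen] at h
      simpa using h
    have s2 : ∀ (S b x : Int) (t : List Int), (List.replicate k (0:Int) ++ (S :: b :: t)).set k x = List.replicate k 0 ++ (x :: b :: t) := by
      intro S b x t
      have h := grav_set_append (List.replicate k (0:Int)) (S :: b :: t) 0 x
      rw [hlen] at h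
      simpa using h
    rw [e1, e2, s1, s2]
    have htake : (row.take (k+1+1)).sum = (row.take (k+1)).sum + row[k+1] := by
      rw [List.take_succ_eq_append_getElem hx, List.sum_append, List.sum_cons, List.sum_nil, add_zero]
    rw [htake, List.replicate_succ', List.append_assoc]
    simp [Int.add_comm]

-- A's "right" branch collapses a row to zeros plus its sum at the right end
theorem grav_right_row (row : List Int) :
    (List.range (row.length - 1)).foldl gravStepR row
      = if row.isEmpty then row
        else List.replicate (row.length - 1) 0 ++ [row.sum] := by
  cases row with
  | nil => simp
  | cons a t =>
    have h := grav_right_inv (a :: t) t.length (by simp)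
    simp only [List.length_cons, Nat.add_sub_cancel] at h ⊢
    rw [h]
    have h1 : (a :: t).take (t.length + 1) = a :: t := List.take_of_length_le (by simp)
    have h2 : (a :: t).drop (t.length + 1) = [] := List.drop_eq_nil_of_le (by simp)
    simp [h1, h2]

-- invariant of A's "left" loop (a foldr over range' a cnt visits the indices
-- a+cnt-1, …, a in that order): cells a…a+cnt-1 become 0 and cell a-1 holds the
-- sum of the original tail from a-1 on
theorem grav_left_inv (row : List Int) (cnt a : Nat) (ha : 1 ≤ a)
    (hlen : a + cnt = row.length) :
    (List.range' a cnt).foldr (fun j r => gravStepL r j) row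
      = row.take (a-1) ++ ((row.drop (a-1)).sum :: List.replicate cnt 0) := by
  induction cnt generalizing a with
  | zero =>
    have h1 : a - 1 < row.length := by omega
    have hd : row.drop (a-1) = [row[a-1]] := by
      rw [List.drop_eq_getElem_cons h1, List.drop_eq_nil_of_le (by omega)]
    rw [List.range'_zero, List.foldr_nil]
    conv_lhs => rw [← List.take_append_drop (a-1) row]
    rw [hd]
    simp
  | succ cnt ih =>
    have hIH := ih (a+1) (by omega) (by omega)
    simp only [Nat.add_sub_cancel] at hIH
    rw [List.range'_succ, List.foldr_cons, hIH]
    have h1 : a - 1 < row.length := by omega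
    have hsplit : row.take a = row.take (a-1) ++ [row[a-1]] := by
      have h := List.take_succ_eq_append_getElem h1
      rwa [Nat.sub_add_cancel ha] at h
    have hpre1 : (row.take (a-1)).length = a - 1 := List.length_take_of_le (by omega)
    rw [hsplit, List.append_assoc, List.cons_append, List.nil_append]
    simp only [gravStepL]
    have e1 : (row.take (a-1) ++ row[a-1] :: (row.drop a).sum :: List.replicate cnt 0).getD a 0
        = (row.drop a).sum := by
      have h := grav_getD_append (row.take (a-1)) (row[a-1] :: (row.drop a).sum :: List.replicate cnt 0) 1
      rw [hpre1, Nat.sub_add_cancel ha] at h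
      simpa using h
    have e2 : (row.take (a-1) ++ row[a-1] :: (row.drop a).sum :: List.replicate cnt 0).getD (a-1) 0
        = row[a-1] := by
      have h := grav_getD_append (row.take (a-1)) (row[a-1] :: (row.drop a).sum :: List.replicate cnt 0) 0
      rw [hpre1] at h
      simpa using h
    rw [e1, e2]
    have s1 : (row.take (a-1) ++ row[a-1] :: (row.drop a).sum :: List.replicate cnt 0).set (a-1) (row[a-1] + (row.drop a).sum)
        = row.take (a-1) ++ (row[a-1] + (row.drop a).sum) :: (row.drop a).sum :: List.replicate cnt 0 := by
      have h := grav_set_append (row.take (a-1)) (row[a-1] :: (row.drop a).sum :: List.replicate cnt 0) 0 (row[a-1] + (row.drop a).sum)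
      rw [hpre1] at h
      simpa using h
    rw [s1]
    have s2 : (row.take (a-1) ++ (row[a-1] + (row.drop a).sum) :: (row.drop a).sum :: List.replicate cnt 0).set a 0
        = row.take (a-1) ++ (row[a-1] + (row.drop a).sum) :: (0:Int) :: List.replicate cnt 0 := by
      have h := grav_set_append (row.take (a-1)) ((row[a-1] + (row.drop a).sum) :: (row.drop a).sum :: List.replicate cnt 0) 1 0
      rw [hpre1, Nat.sub_add_cancel ha] at h
      simpa using h
    rw [s2]
    have hd : row.drop (a-1) = row[a-1] :: row.drop a := by
      rw [List.drop_eq_getElem_cons h1, Nat.sub_add_cancel ha]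
    rw [hd]
    simp [List.replicate_succ]

-- A's "left" branch collapses a row to its sum at the left end plus zeros
theorem grav_left_row (row : List Int) :
    (((List.range (row.length - 1)).map (· + 1)).reverse).foldl gravStepL row
      = if row.isEmpty then row
        else row.sum :: List.replicate (row.length - 1) 0 := by
  cases row with
  | nil => simp
  | cons x t =>
    have hmap : (List.range ((x :: t).length - 1)).map (· + 1) = List.range' 1 t.length := by
      simp [List.range'_eq_map_range, Nat.add_comm]
    rw [hmap, List.foldl_reverse]
    have h := grav_left_inv (x :: t) t.length 1 (by omega) (by simp [Nat.add_comm])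
    simp only [Nat.sub_self, List.take_zero, List.drop_zero, List.nil_append] at h
    rw [h]
    simp

-- ===== VERDICT (by name: the statement is the Claim_ definition above) =====
theorem gravitate_spec : Claim_equal_gravitate := by
  intro nums direction _
  unfold Spec_gravitate gravitate gravitate_alt
  by_cases h : (direction == "right") = true
  · rw [if_pos h]
    refine List.map_congr_left fun row _ => ?_
    rw [grav_right_row]
    by_cases he : row.isEmpty
    · simp [he]
    · simp [he, h]
  · rw [if_neg h]
    refine List.map_congr_left fun row _ => ?_
    rw [grav_left_row]
    by_cases he : row.isEmpty
    · simp [he]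
    · simp [he, h]
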